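-- pv_equiv track=rewrite | github.com/ronicse59/iPro70-FMWin | methods.py | distance_count
-- ===== SOURCE A (Python) =====
-- def distance_count(string, char):
--     index = []
--     cnt = 0
--     for i in range(len(string)):
--         if string[i] == char:
--             index.append(i)
--
--     for i in range(1, len(index)):
--         cnt += (index[i] - index[i - 1])
--     return cnt
-- ===== SOURCE B (Python) =====
-- def distance_count(string, char):
--     first = None
--     last = None
--     for i in range(len(string)):
--         if string[i] == char:
--             if first is None:
--                 first = i
--             last = i
--     return 0 if first is None else last - first
-- ===== Notes on version B (the rewrite author's own statement) =====
-- stated objective: simpler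
-- what changed: B replaces A's build-a-list-of-indices-then-sum-consecutive-differences with a single pass tracking only first and last match positions, returning the telescoped value last - first (0 if no match).
import Mathlib
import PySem

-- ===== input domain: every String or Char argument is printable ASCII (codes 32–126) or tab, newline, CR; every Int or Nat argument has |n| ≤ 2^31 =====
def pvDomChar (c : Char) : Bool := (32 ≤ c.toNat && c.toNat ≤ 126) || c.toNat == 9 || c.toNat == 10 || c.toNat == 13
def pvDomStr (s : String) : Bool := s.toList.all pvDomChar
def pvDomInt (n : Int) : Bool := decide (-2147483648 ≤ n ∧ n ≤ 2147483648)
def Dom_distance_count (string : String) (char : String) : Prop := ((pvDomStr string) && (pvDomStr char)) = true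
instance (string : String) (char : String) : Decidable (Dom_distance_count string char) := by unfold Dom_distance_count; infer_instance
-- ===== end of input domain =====

-- B replaces A's build-a-list-of-matching-indices-then-sum-consecutive-differences with a
-- single pass tracking first/last match positions, returning last - first (0 if no match): simpler, O(1) space.

-- ===== PORT A =====
-- first loop of A: collect the indices i with string[i] == char (string[i] is a 1-char string)
def dcCollect : List Char → String → Int → List Int
  | [], _, _ => []
  | c :: cs, char, i =>
    if String.ofList [c] == char then i :: dcCollect cs char (i + 1)
    else dcCollect cs char (i + 1)

-- second loop of A: cnt += index[i] - index[i-1] over consecutive pairs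
def dcSum : List Int → Int
  | [] => 0
  | [_] => 0
  | a :: b :: rest => (b - a) + dcSum (b :: rest)

def distance_count (string : String) (char : String) : Int :=
  dcSum (dcCollect string.toList char 0)

-- ===== PORT B =====
-- B's single loop: keep the first and the last matching index
def dcScan : List Char → String → Int → Option Int → Option Int → Option Int × Option Int
  | [], _, _, first, last => (first, last)
  | c :: cs, char, i, first, last =>
    if String.ofList [c] == char then
      dcScan cs char (i + 1) (if first.isNone then some i else first) (some i)
    else
      dcScan cs char (i + 1) first last

def distance_count_alt (string : String) (char : String) : Int :=
  match dcScan string.toList char 0 none none with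
  | (some f, some la) => la - f
  | _ => 0

-- ===== PRECONDITION & SPEC =====
def Spec_distance_count (string : String) (char : String) (out : Int) : Prop := out = distance_count_alt string char
instance (string : String) (char : String) (out : Int) : Decidable (Spec_distance_count string char out) := by unfold Spec_distance_count; infer_instance

-- ===== CLAIM (what is proved, stated in full; the proofs are below) =====
def Claim_equal_distance_count : Prop := ∀ (string : String) (char : String), Dom_distance_count string char → Spec_distance_count string char (distance_count string char)

-- ===== LEMMAS AND PROOFS =====

-- A's second loop telescopes: starting from a, the sum is last - first
theorem dcSum_cons (a : Int) (l : List Int) : dcSum (a :: l) = l.getLastD a - a := by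
  induction l generalizing a with
  | nil => simp [dcSum]
  | cons b rest ih =>
    rw [dcSum, ih b, List.getLastD_cons]
    omega

-- B's scan with both slots filled just updates the last slot to the last collected index
theorem dcScan_some (cs : List Char) (char : String) (i f la : Int) :
    dcScan cs char i (some f) (some la) = (some f, some ((dcCollect cs char i).getLastD la)) := by
  induction cs generalizing i la with
  | nil => simp [dcScan, dcCollect]
  | cons c cs ih =>
    by_cases h : String.ofList [c] == char
    · rw [dcScan, dcCollect]; simp only [h, if_true, Option.isNone_some, Bool.false_eq_true, if_false]
      rw [ih, List.getLastD_cons]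
    · simp [dcScan, dcCollect, h, ih]

-- B's scan from the empty state, characterised by A's collected index list
theorem dcScan_none (cs : List Char) (char : String) (i : Int) :
    dcScan cs char i none none =
      (match dcCollect cs char i with
       | [] => (none, none)
       | a :: l => (some a, some (l.getLastD a))) := by
  induction cs generalizing i with
  | nil => simp [dcScan, dcCollect]
  | cons c cs ih =>
    by_cases h : String.ofList [c] == char
    · simp [dcScan, dcCollect, h, dcScan_some]
    · simp [dcScan, dcCollect, h, ih]

-- ===== VERDICT (by name: the statement is the Claim_ definition above) =====
theorem distance_count_spec : Claim_equal_distance_count := by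
  intro s char _
  show distance_count s char = distance_count_alt s char
  unfold distance_count distance_count_alt
  rw [dcScan_none]
  cases h : dcCollect s.toList char 0 with
  | nil => simp [dcSum]
  | cons a l => simp [dcSum_cons]
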